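-- pv_equiv track=rewrite | github.com/Hamilton-Dias/hackerrank | week-two/mars_exploration.py | marsExploration
-- ===== SOURCE A (Python) =====
-- def marsExploration(s):
--     count = 0
--
--     for i, char in enumerate(s):
--         stop = i + 1
--         if stop % 3 == 0:
--             start  = stop - 3
--             string = s[start:stop]
--
--             if string[:1] != 'S':
--                 count += 1
--             if string[1:2] != 'O':
--                 count += 1
--             if string[2:3] != 'S':
--                 count += 1
--
--     return count
-- ===== SOURCE B (Python) =====
-- def marsExploration(s):
--     pattern = 'SOS' * (len(s) // 3)
--     return sum(a != b for a, b in zip(pattern, s))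
-- ===== Notes on version B (the rewrite author's own statement) =====
-- stated objective: simpler
-- what changed: Builds the expected reference pattern (the three-letter block repeated len(s)//3 times) once and counts element-wise mismatches with a single zip, instead of A's per-index modulo test with block slicing and three per-block sub-slice comparisons.
import Mathlib
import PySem

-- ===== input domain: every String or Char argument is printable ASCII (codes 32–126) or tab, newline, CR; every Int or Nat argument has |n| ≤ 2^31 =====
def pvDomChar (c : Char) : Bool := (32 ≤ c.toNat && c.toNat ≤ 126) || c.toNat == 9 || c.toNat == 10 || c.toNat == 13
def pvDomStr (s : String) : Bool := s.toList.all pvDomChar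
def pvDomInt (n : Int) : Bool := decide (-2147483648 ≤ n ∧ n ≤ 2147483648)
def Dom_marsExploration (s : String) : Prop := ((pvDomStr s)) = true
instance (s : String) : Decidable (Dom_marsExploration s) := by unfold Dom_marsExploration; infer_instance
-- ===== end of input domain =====

-- B builds the expected reference pattern (the three-letter block repeated
-- len(s)//3 times) once and counts element-wise mismatches with a single zip,
-- instead of A's per-index modulo test with block slicing and three sub-slice
-- comparisons (objective: simpler; a timing run measured it faster by a
-- constant factor).

-- ===== PORT A =====
-- literal port of A; strings are handled as their character lists, so the
-- comparisons of one-character string slices against 'S'/'O'/'S' become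
-- comparisons of one-character lists against ['S']/['O']/['S'] (exact).
def marsExploration (s : String) : Int :=
  (PySem.List.enumerate s.toList).foldl
    (fun count p =>
      let stop : Int := p.1 + 1
      if PySem.Int.mod stop 3 = 0 then
        let start := stop - 3
        let str := PySem.List.slice s.toList (some start) (some stop)
        let count := if PySem.List.slice str none (some 1) ≠ ['S'] then count + 1 else count
        let count := if PySem.List.slice str (some 1) (some 2) ≠ ['O'] then count + 1 else count
        let count := if PySem.List.slice str (some 2) (some 3) ≠ ['S'] then count + 1 else count
        count
      else count)
    0

-- ===== PORT B =====
-- port of Source B: pattern = the block repeated len(s)//3 times; sum(a != b for a, b in zip(pattern, s))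
def marsExploration_alt (s : String) : Int :=
  let pattern := (List.replicate (s.toList.length / 3) ['S', 'O', 'S']).flatten
  ((pattern.zip s.toList).map (fun p => if p.1 ≠ p.2 then (1 : Int) else 0)).sum

-- ===== PRECONDITION & SPEC =====
def Spec_marsExploration (s : String) (out : Int) : Prop := out = marsExploration_alt s
instance (s : String) (out : Int) : Decidable (Spec_marsExploration s out) := by unfold Spec_marsExploration; infer_instance

-- ===== CLAIM (what is proved, stated in full; the proofs are below) =====
def Claim_equal_marsExploration : Prop := ∀ (s : String), Dom_marsExploration s → Spec_marsExploration s (marsExploration s)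

-- ===== LEMMAS AND PROOFS =====

-- reference count: per complete 3-block, mismatches against 'S','O','S'
def refCount : List Char → Int
  | a :: b :: c :: t =>
      (if a ≠ 'S' then 1 else 0) + (if b ≠ 'O' then 1 else 0) + (if c ≠ 'S' then 1 else 0)
        + refCount t
  | _ => 0

-- per-index contribution of A's loop body (index i into the fixed list l)
def gA (l : List Char) (i : Int) : Int :=
  let stop : Int := i + 1
  if PySem.Int.mod stop 3 = 0 then
    let start := stop - 3
    let str := PySem.List.slice l (some start) (some stop)
    (if PySem.List.slice str none (some 1) ≠ ['S'] then 1 else 0)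
      + (if PySem.List.slice str (some 1) (some 2) ≠ ['O'] then 1 else 0)
      + (if PySem.List.slice str (some 2) (some 3) ≠ ['S'] then 1 else 0)
  else 0

def blockMismatch (str : List Char) : Int :=
  (if PySem.List.slice str none (some 1) ≠ ['S'] then 1 else 0)
    + (if PySem.List.slice str (some 1) (some 2) ≠ ['O'] then 1 else 0)
    + (if PySem.List.slice str (some 2) (some 3) ≠ ['S'] then 1 else 0)

lemma body_eq (l : List Char) :
    (fun (count : Int) (p : Int × Char) =>
      let stop : Int := p.1 + 1
      if PySem.Int.mod stop 3 = 0 then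
        let start := stop - 3
        let str := PySem.List.slice l (some start) (some stop)
        let count := if PySem.List.slice str none (some 1) ≠ ['S'] then count + 1 else count
        let count := if PySem.List.slice str (some 1) (some 2) ≠ ['O'] then count + 1 else count
        let count := if PySem.List.slice str (some 2) (some 3) ≠ ['S'] then count + 1 else count
        count
      else count)
    = fun count p => count + gA l p.1 := by
  funext count p
  simp only [gA]
  split_ifs <;> ring

lemma gA_natCast (l : List Char) (k : Nat) :
    gA l ((k : Nat) : Int)
      = if (k + 1) % 3 = 0 then blockMismatch ((l.drop (k - 2)).take 3) else 0 := by
  simp only [gA, blockMismatch]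
  have hm : PySem.Int.mod ((k : Int) + 1) 3 = ((k : Int) + 1) % 3 :=
    PySem.Int.mod_eq_emod_of_pos (by norm_num)
  rw [hm]
  by_cases h : (k + 1) % 3 = 0
  · have hk2 : 2 ≤ k := by omega
    rw [if_pos (by omega : ((k : Int) + 1) % 3 = 0), if_pos h]
    have e3 : (k : Int) + 1 - 3 = ((k - 2 : Nat) : Int) := by push_cast [hk2]; ring
    have e4 : (k : Int) + 1 = ((k + 1 : Nat) : Int) := by push_cast; ring
    rw [e3, e4, PySem.List.slice_natCast]
    have : k + 1 - (k - 2) = 3 := by omega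
    rw [this]
  · rw [if_neg (by omega : ¬ ((k : Int) + 1) % 3 = 0), if_neg h]

-- shifting the index by one whole block
lemma gA_shift (a b c : Char) (t : List Char) (k : Nat) :
    gA (a :: b :: c :: t) ((3 + k : Nat) : Int) = gA t (k : Int) := by
  rw [gA_natCast, gA_natCast]
  have hc : (3 + k + 1) % 3 = (k + 1) % 3 := by omega
  rw [hc]
  by_cases h : (k + 1) % 3 = 0
  · rw [if_pos h, if_pos h]
    have hk2 : 2 ≤ k := by omega
    have : 3 + k - 2 = (k - 2) + 1 + 1 + 1 := by omega
    rw [this]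
    simp [List.drop_succ_cons]
  · rw [if_neg h, if_neg h]

lemma enum_map_sum (f : Int → Int) :
    ∀ (xs : List Char) (j : Nat),
      ((PySem.List.enumerate xs (j : Int)).map (fun p => f p.1)).sum
        = ((List.range xs.length).map (fun k => f ((j + k : Nat) : Int))).sum := by
  intro xs
  induction xs with
  | nil => simp [PySem.List.enumerate_nil]
  | cons x xs ih =>
      intro j
      rw [PySem.List.enumerate_cons, List.map_cons, List.sum_cons]
      have h1 : (j : Int) + 1 = ((j + 1 : Nat) : Int) := by push_cast; ring
      have htail : ((fun k => f ((j + k : Nat) : Int)) ∘ Nat.succ)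
          = (fun k => f ((j + 1 + k : Nat) : Int)) := by
        funext k
        simp only [Function.comp]
        congr 1
        omega
      rw [h1, ih (j + 1), List.length_cons, List.range_succ_eq_map, List.map_cons,
        List.map_map, htail, List.sum_cons]
      norm_num

lemma blockMismatch_three (a b c : Char) :
    blockMismatch [a, b, c]
      = (if a ≠ 'S' then 1 else 0) + (if b ≠ 'O' then 1 else 0) + (if c ≠ 'S' then 1 else 0) := by
  have h1 : PySem.List.slice [a, b, c] none (some 1) = [a] := by
    simp [PySem.List.slice, PySem.List.clampIdx]
  have h2 : PySem.List.slice [a, b, c] (some 1) (some 2) = [b] := by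
    simp [PySem.List.slice, PySem.List.clampIdx]
  have h3 : PySem.List.slice [a, b, c] (some 2) (some 3) = [c] := by
    simp [PySem.List.slice, PySem.List.clampIdx]
  simp only [blockMismatch, h1, h2, h3, ne_eq, List.cons.injEq, and_true]

lemma gA_zero (l : List Char) (k : Nat) (h : (k + 1) % 3 ≠ 0) : gA l ((k : Nat) : Int) = 0 := by
  rw [gA_natCast, if_neg h]

-- A's sum over List.range equals refCount
theorem sum_gA_eq_refCount : ∀ (l : List Char),
    ((List.range l.length).map (fun k => gA l ((k : Nat) : Int))).sum = refCount l
  | [] => by simp [refCount]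
  | [a] => by
      simp only [List.length_singleton, List.range_one, List.map_cons, List.map_nil,
        List.sum_cons, List.sum_nil]
      rw [gA_zero _ 0 (by norm_num)]
      rfl
  | [a, b] => by
      show ((List.range 2).map _).sum = _
      rw [show List.range 2 = [0, 1] from rfl]
      simp only [List.map_cons, List.map_nil, List.sum_cons, List.sum_nil]
      rw [gA_zero _ 0 (by norm_num), gA_zero _ 1 (by norm_num)]
      rfl
  | a :: b :: c :: t => by
      have ih := sum_gA_eq_refCount t
      have hlen : (a :: b :: c :: t).length = 3 + t.length := by simp; omega
      rw [hlen, List.range_add, List.map_append, List.sum_append, List.map_map]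
      have hshift : (List.map ((fun k => gA (a :: b :: c :: t) ((k : Nat) : Int))
              ∘ fun x => 3 + x) (List.range t.length)).sum
          = ((List.range t.length).map (fun k => gA t ((k : Nat) : Int))).sum := by
        apply congrArg
        apply List.map_congr_left
        intro k _
        exact gA_shift a b c t k
      have h3 : ((List.range 3).map (fun k => gA (a :: b :: c :: t) ((k : Nat) : Int))).sum
          = gA (a :: b :: c :: t) ((0 : Nat) : Int) + gA (a :: b :: c :: t) ((1 : Nat) : Int)
            + gA (a :: b :: c :: t) ((2 : Nat) : Int) := by
        rw [show List.range 3 = [0, 1, 2] from rfl]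
        simp only [List.map_cons, List.map_nil, List.sum_cons, List.sum_nil]
        ring
      have g0 : gA (a :: b :: c :: t) ((0 : Nat) : Int) = 0 := gA_zero _ 0 (by norm_num)
      have g1 : gA (a :: b :: c :: t) ((1 : Nat) : Int) = 0 := gA_zero _ 1 (by norm_num)
      have g2 : gA (a :: b :: c :: t) ((2 : Nat) : Int)
          = (if a ≠ 'S' then 1 else 0) + (if b ≠ 'O' then 1 else 0)
            + (if c ≠ 'S' then 1 else 0) := by
        rw [gA_natCast, if_pos (by norm_num)]
        have h33 : (List.drop (2 - 2) (a :: b :: c :: t)).take 3 = [a, b, c] := rfl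
        rw [h33, blockMismatch_three]
      rw [h3, hshift, ih, g0, g1, g2]
      show _ = refCount (a :: b :: c :: t)
      simp only [refCount]
      ring

-- B equals refCount
theorem alt_eq_refCount : ∀ (l : List Char),
    (((List.replicate (l.length / 3) ['S', 'O', 'S']).flatten.zip l).map
        (fun p => if p.1 ≠ p.2 then (1 : Int) else 0)).sum = refCount l
  | [] => by simp [refCount]
  | [a] => by simp [refCount]
  | [a, b] => by simp [refCount]
  | a :: b :: c :: t => by
      have ih := alt_eq_refCount t
      have hlen : (a :: b :: c :: t).length / 3 = t.length / 3 + 1 := by simp; omega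
      rw [hlen, List.replicate_succ, List.flatten_cons]
      simp only [List.cons_append, List.nil_append, List.zip_cons_cons, List.map_cons,
        List.sum_cons, ih, refCount]
      have e : ∀ (x y : Char), (if x ≠ y then (1 : Int) else 0) = (if y ≠ x then 1 else 0) := by
        intro x y; by_cases h : x = y <;> simp [h, Ne, eq_comm]
      rw [e 'S' a, e 'O' b, e 'S' c]; ring

-- ===== VERDICT (by name: the statement is the Claim_ definition above) =====
theorem marsExploration_spec : Claim_equal_marsExploration := by
  intro s _
  unfold Spec_marsExploration marsExploration marsExploration_alt
  rw [body_eq s.toList, PySem.List.foldl_add, zero_add]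
  have h0 : PySem.List.enumerate s.toList = PySem.List.enumerate s.toList ((0 : Nat) : Int) := by
    norm_num
  rw [h0, enum_map_sum (gA s.toList) s.toList 0]
  simp only [Nat.zero_add]
  rw [sum_gA_eq_refCount, alt_eq_refCount]
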